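-- pv_equiv track=rewrite | github.com/Ning0233/DSA | TIP102/u3/5.py | group_animals_by_habitat
-- ===== SOURCE A (Python) =====
-- def group_animals_by_habitat(habitats):
--     last_occurrence = {habitat: idx for idx, habitat in enumerate(habitats)}
--     r = []
--     start = end = 0
--     for idx, habitat in enumerate(habitats):
--         end = max(end, last_occurrence[habitat])
--         if idx == end:
--             r.append(end - start + 1)
--             start = end + 1
--     return r
-- ===== SOURCE B (Python) =====
-- def group_animals_by_habitat(habitats):
--     r = []
--     start = 0
--     for i in range(len(habitats)):
--         if set(habitats[:i + 1]).isdisjoint(habitats[i + 1:]):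
--             r.append(i - start + 1)
--             start = i + 1
--     return r
-- ===== Notes on version B (the rewrite author's own statement) =====
-- stated objective: simpler
-- what changed: B drops the last-occurrence dict and the running max entirely: it cuts a chunk at index i exactly when the prefix habitats[:i+1] shares no habitat with the suffix habitats[i+1:], checked with a set-disjointness test.
import Mathlib
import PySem

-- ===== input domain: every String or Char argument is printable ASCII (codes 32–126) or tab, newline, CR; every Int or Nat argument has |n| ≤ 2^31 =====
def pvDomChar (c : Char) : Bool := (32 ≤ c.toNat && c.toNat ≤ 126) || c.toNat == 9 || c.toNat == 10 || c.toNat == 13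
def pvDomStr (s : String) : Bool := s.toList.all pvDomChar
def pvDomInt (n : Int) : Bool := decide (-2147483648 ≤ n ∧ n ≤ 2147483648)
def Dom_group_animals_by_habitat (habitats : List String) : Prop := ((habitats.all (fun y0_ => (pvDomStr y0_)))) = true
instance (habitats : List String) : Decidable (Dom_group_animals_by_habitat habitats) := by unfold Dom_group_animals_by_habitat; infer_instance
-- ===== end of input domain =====

-- B replaces A's last-occurrence dict and running max by a direct prefix/suffix
-- set-disjointness cut test: simpler code, same return value (no mutation involved).

-- ===== PORT A =====
-- {habitat: idx for idx, habitat in enumerate(habitats)}  (last write wins)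
def pvBuildLO (l : List String) : PySem.Dict String Int :=
  (PySem.List.enumerate l 0).foldl (fun d p => d.insert p.2 p.1) PySem.Dict.empty

-- loop body of A: state (r, start, end)
def pvStepA (lo : PySem.Dict String Int) (st : List Int × Int × Int) (p : Int × String) :
    List Int × Int × Int :=
  let e := max st.2.2 (lo.getD p.2 0)
  if p.1 = e then (st.1 ++ [e - st.2.1 + 1], e + 1, e) else (st.1, st.2.1, e)

def group_animals_by_habitat (habitats : List String) : List Int :=
  ((PySem.List.enumerate habitats 0).foldl (pvStepA (pvBuildLO habitats)) ([], 0, 0)).1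

-- ===== PORT B =====
-- loop body of B: state (r, start); cut iff set(habitats[:i+1]).isdisjoint(habitats[i+1:])
def pvStepB (l : List String) (st : List Int × Int) (i : Int) : List Int × Int :=
  if PySem.Set.isdisjoint (PySem.Set.ofList (PySem.List.slice l none (some (i + 1))))
      (PySem.List.slice l (some (i + 1)) none)
  then (st.1 ++ [i - st.2 + 1], i + 1) else st

def group_animals_by_habitat_alt (habitats : List String) : List Int :=
  ((PySem.List.pyRange 0 habitats.length 1).foldl (pvStepB habitats) ([], 0)).1

-- ===== PRECONDITION & SPEC =====
def Spec_group_animals_by_habitat (habitats : List String) (out : List Int) : Prop := out = group_animals_by_habitat_alt habitats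
instance (habitats : List String) (out : List Int) : Decidable (Spec_group_animals_by_habitat habitats out) := by unfold Spec_group_animals_by_habitat; infer_instance

-- ===== CLAIM (what is proved, stated in full; the proofs are below) =====
def Claim_equal_group_animals_by_habitat : Prop := ∀ (habitats : List String), Dom_group_animals_by_habitat habitats → Spec_group_animals_by_habitat habitats (group_animals_by_habitat habitats)

-- ===== LEMMAS AND PROOFS =====

-- value of A's `end` variable after the first k iterations
def pvPriorEnd (l : List String) (k : Nat) : Int :=
  ((l.take k).map (fun h => (pvBuildLO l).getD h 0)).foldl max 0

theorem pv_le_foldl_max_init (xs : List Int) (a : Int) : a ≤ xs.foldl max a := by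
  induction xs generalizing a with
  | nil => simp
  | cons x t ih => exact le_trans (le_max_left a x) (ih _)

theorem pv_le_foldl_max (xs : List Int) (a x : Int) (hx : x ∈ xs) : x ≤ xs.foldl max a := by
  induction xs generalizing a with
  | nil => cases hx
  | cons y t ih =>
    rcases List.mem_cons.1 hx with h | h
    · subst h; exact le_trans (le_max_right a x) (pv_le_foldl_max_init _ _)
    · exact ih _ h

theorem pv_foldl_max_le (xs : List Int) (a b : Int) (ha : a ≤ b) (h : ∀ x ∈ xs, x ≤ b) :
    xs.foldl max a ≤ b := by
  induction xs generalizing a with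
  | nil => simpa using ha
  | cons y t ih =>
    exact ih _ (max_le ha (h y (List.mem_cons_self))) (fun x hx => h x (List.mem_cons_of_mem _ hx))

theorem pvBuildLO_snoc (l : List String) (x : String) :
    pvBuildLO (l ++ [x]) = (pvBuildLO l).insert x (l.length : Int) := by
  unfold pvBuildLO
  rw [PySem.List.enumerate_append, List.foldl_append]
  simp [PySem.List.enumerate]

theorem pv_lo_getD_ge (l : List String) (k : Nat) (hk : k < l.length) :
    (k : Int) ≤ (pvBuildLO l).getD l[k] 0 := by
  induction l using List.reverseRecOn with
  | nil => simp at hk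
  | append_singleton init x ih =>
    rw [pvBuildLO_snoc]
    rcases Nat.lt_or_ge k init.length with h | h
    · rw [List.getElem_append_left h]
      rw [PySem.Dict.getD_insert]
      split
      · exact_mod_cast Nat.le_of_lt h
      · exact ih h
    · have hkeq : k = init.length := by
        simp [List.length_append] at hk; omega
      subst hkeq
      rw [List.getElem_append_right (Nat.le_refl _)]
      simp [PySem.Dict.getD_insert_self]

theorem pv_lo_getD_mem (l : List String) (h : String) (hm : h ∈ l) :
    ∃ k : Nat, ∃ hk : k < l.length, l[k] = h ∧ (pvBuildLO l).getD h 0 = (k : Int) := by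
  induction l using List.reverseRecOn with
  | nil => cases hm
  | append_singleton init x ih =>
    rw [pvBuildLO_snoc]
    by_cases hx : h = x
    · subst hx
      refine ⟨init.length, by simp, ?_, ?_⟩
      · rw [List.getElem_append_right (Nat.le_refl _)]; simp
      · rw [PySem.Dict.getD_insert_self]
    · have hmem : h ∈ init := by
        rcases List.mem_append.1 hm with h1 | h1
        · exact h1
        · simp at h1; exact absurd h1 hx
      rcases ih hmem with ⟨k, hk, hget, hval⟩
      refine ⟨k, by simp; omega, ?_, ?_⟩
      · rw [List.getElem_append_left hk]; exact hget
      · rw [PySem.Dict.getD_insert, if_neg hx]; exact hval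

theorem pvPriorEnd_succ (l : List String) (k : Nat) (hk : k < l.length) :
    pvPriorEnd l (k + 1) = max (pvPriorEnd l k) ((pvBuildLO l).getD l[k] 0) := by
  unfold pvPriorEnd
  conv_lhs => rw [List.take_add_one, List.getElem?_eq_getElem hk]
  simp only [Option.toList, List.map_append, List.map_cons, List.map_nil,
    List.foldl_append, List.foldl_cons, List.foldl_nil]

-- the cut conditions of A and B agree at every index
theorem pv_cond_iff (l : List String) (k : Nat) (hk : k < l.length) :
    ((k : Int) = pvPriorEnd l (k + 1)) ↔
      ∀ h ∈ l.take (k + 1), h ∉ l.drop (k + 1) := by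
  constructor
  · intro heq h hpre hsuf
    rcases List.mem_iff_getElem.1 hsuf with ⟨j, hj, hgj⟩
    rw [List.getElem_drop] at hgj
    have hjl : k + 1 + j < l.length := by
      have := hj; simp [List.length_drop] at this; omega
    have hge : ((k + 1 + j : Nat) : Int) ≤ (pvBuildLO l).getD h 0 := by
      have := pv_lo_getD_ge l (k + 1 + j) hjl
      rwa [hgj] at this
    have hmem : (pvBuildLO l).getD h 0 ∈
        ((l.take (k + 1)).map (fun h => (pvBuildLO l).getD h 0)) :=
      List.mem_map_of_mem hpre
    have hle : (pvBuildLO l).getD h 0 ≤ pvPriorEnd l (k + 1) :=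
      pv_le_foldl_max _ _ _ hmem
    rw [← heq] at hle
    have : ((k + 1 + j : Nat) : Int) ≤ (k : Int) := le_trans hge hle
    push_cast at this; omega
  · intro hdisj
    have hub : pvPriorEnd l (k + 1) ≤ (k : Int) := by
      apply pv_foldl_max_le
      · exact_mod_cast Int.natCast_nonneg k
      · intro x hx
        rcases List.mem_map.1 hx with ⟨h, hpre, rfl⟩
        have hl : h ∈ l := List.mem_of_mem_take hpre
        rcases pv_lo_getD_mem l h hl with ⟨j, hj, hgj, hval⟩
        rw [hval]
        by_contra hgt
        push Not at hgt
        have hjk : k + 1 ≤ j := by omega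
        apply hdisj h hpre
        apply List.mem_iff_getElem.2
        refine ⟨j - (k + 1), by simp [List.length_drop]; omega, ?_⟩
        rw [List.getElem_drop]
        have : k + 1 + (j - (k + 1)) = j := by omega
        simp only [this]; exact hgj
    have hlb : (k : Int) ≤ pvPriorEnd l (k + 1) := by
      have hmem : (pvBuildLO l).getD l[k] 0 ∈
          ((l.take (k + 1)).map (fun h => (pvBuildLO l).getD h 0)) := by
        apply List.mem_map_of_mem
        apply List.mem_iff_getElem.2
        exact ⟨k, by simp [List.length_take]; omega, by rw [List.getElem_take]⟩
      exact le_trans (pv_lo_getD_ge l k hk) (pv_le_foldl_max _ _ _ hmem)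
    omega

-- B's boolean cut test at index k, as the same proposition
theorem pv_condB (l : List String) (k : Nat) :
    (PySem.Set.isdisjoint (PySem.Set.ofList (PySem.List.slice l none (some ((k : Int) + 1))))
        (PySem.List.slice l (some ((k : Int) + 1)) none) = true) ↔
      ∀ h ∈ l.take (k + 1), h ∉ l.drop (k + 1) := by
  have h1 : ((k : Int) + 1) = ((k + 1 : Nat) : Int) := by push_cast; ring
  rw [h1, PySem.List.slice_to_natCast, PySem.List.slice_from_natCast,
    PySem.Set.isdisjoint_iff]
  constructor
  · intro hd h hpre; exact hd h ((PySem.Set.mem_ofList _ _).2 hpre)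
  · intro hd h hpre; exact hd h ((PySem.Set.mem_ofList _ _).1 hpre)

theorem pv_loop_eq (l : List String) (rest : List String) :
    ∀ (k : Nat) (r : List Int) (s : Int), l.drop k = rest →
    ((PySem.List.enumerate rest (k : Int)).foldl (pvStepA (pvBuildLO l)) (r, s, pvPriorEnd l k)).1
      = ((PySem.List.pyRange (k : Int) (l.length : Int) 1).foldl (pvStepB l) (r, s)).1 := by
  induction rest with
  | nil =>
    intro k r s hdrop
    have hk : l.length ≤ k := by
      have := congrArg List.length hdrop; simp [List.length_drop] at this; omega
    have : PySem.List.pyRange (k : Int) (l.length : Int) 1 = [] := by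
      rw [PySem.List.pyRange_one]
      have : (((l.length : Int)) - (k : Int)).toNat = 0 := by omega
      simp [this]
    rw [this]
    simp [PySem.List.enumerate]
  | cons h t ih =>
    intro k r s hdrop
    have hk : k < l.length := by
      have := congrArg List.length hdrop; simp [List.length_drop] at this; omega
    have hget : l[k] = h := by
      have h0 : (l.drop k)[0]? = some h := by rw [hdrop]; rfl
      rw [List.getElem?_drop, Nat.add_zero, List.getElem?_eq_getElem hk] at h0
      exact Option.some.inj h0
    have hdrop' : l.drop (k + 1) = t := by
      have : l.drop (k + 1) = (l.drop k).drop 1 := by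
        rw [List.drop_drop]
      rw [this, hdrop]; simp
    rw [PySem.List.enumerate_cons, PySem.List.pyRange_one_cons (by exact_mod_cast hk)]
    simp only [List.foldl_cons]
    have hstepA : pvStepA (pvBuildLO l) (r, s, pvPriorEnd l k) ((k : Int), h) =
        if (k : Int) = pvPriorEnd l (k + 1)
        then (r ++ [pvPriorEnd l (k + 1) - s + 1], pvPriorEnd l (k + 1) + 1, pvPriorEnd l (k + 1))
        else (r, s, pvPriorEnd l (k + 1)) := by
      unfold pvStepA
      simp only []
      rw [show max (pvPriorEnd l k) ((pvBuildLO l).getD h 0) = pvPriorEnd l (k + 1) by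
        rw [pvPriorEnd_succ l k hk, hget]]
    have hstepB : pvStepB l (r, s) (k : Int) =
        if (k : Int) = pvPriorEnd l (k + 1)
        then (r ++ [(k : Int) - s + 1], (k : Int) + 1)
        else (r, s) := by
      unfold pvStepB
      by_cases hc : (k : Int) = pvPriorEnd l (k + 1)
      · rw [if_pos hc, if_pos ((pv_condB l k).2 ((pv_cond_iff l k hk).1 hc))]
      · rw [if_neg hc, if_neg]
        intro hb
        exact hc ((pv_cond_iff l k hk).2 ((pv_condB l k).1 hb))
    rw [hstepA, hstepB]
    by_cases hc : (k : Int) = pvPriorEnd l (k + 1)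
    · rw [if_pos hc, if_pos hc]
      have := ih (k + 1) (r ++ [pvPriorEnd l (k + 1) - s + 1]) (pvPriorEnd l (k + 1) + 1) hdrop'
      rw [← hc] at this ⊢
      push_cast at this ⊢
      exact this
    · rw [if_neg hc, if_neg hc]
      have := ih (k + 1) r s hdrop'
      push_cast at this ⊢
      exact this

-- ===== VERDICT (by name: the statement is the Claim_ definition above) =====
theorem group_animals_by_habitat_spec : Claim_equal_group_animals_by_habitat := by
  intro habitats _
  unfold Spec_group_animals_by_habitat group_animals_by_habitat group_animals_by_habitat_alt
  have h := pv_loop_eq habitats habitats 0 [] 0 (by simp)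
  simpa [pvPriorEnd] using h
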